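-- pv_equiv track=rewrite | github.com/danielperico/Testrep | clean_tweets.py | strip_all_entities
-- ===== SOURCE A (Python) =====
-- import string
--
-- def strip_all_entities(text):
--     entity_prefixes = ['@', '#']
--     for seperator in string.punctuation:
--         if seperator not in entity_prefixes:
--             text = text.replace(seperator, ' ')
--     words = []
--     for word in text.split():
--         word = word.strip()
--         if word:
--             if word[0] not in entity_prefixes:
--                 words.append(word)
--     return ' '.join(words)
-- ===== SOURCE B (Python) =====
-- import string
--
-- def strip_all_entities(text):
--     entity_prefixes = ('@', '#')
--     delims = set(string.punctuation) - set(entity_prefixes)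
--     kept = []
--     buf = []
--     for c in text:
--         if c in delims or c.isspace():
--             if buf:
--                 if buf[0] not in entity_prefixes:
--                     kept.append(''.join(buf))
--                 buf = []
--         else:
--             buf.append(c)
--     if buf and buf[0] not in entity_prefixes:
--         kept.append(''.join(buf))
--     return ' '.join(kept)
-- ===== Notes on version B (the rewrite author's own statement) =====
-- stated objective: alternative
-- what changed: Replaces A's ~30 whole-string replace passes followed by split/strip/filter/join with a single left-to-right character scan that maintains a token buffer, flushes at delimiters (punctuation minus @/# plus whitespace) and keeps tokens not starting with @/#.
import Mathlib
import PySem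

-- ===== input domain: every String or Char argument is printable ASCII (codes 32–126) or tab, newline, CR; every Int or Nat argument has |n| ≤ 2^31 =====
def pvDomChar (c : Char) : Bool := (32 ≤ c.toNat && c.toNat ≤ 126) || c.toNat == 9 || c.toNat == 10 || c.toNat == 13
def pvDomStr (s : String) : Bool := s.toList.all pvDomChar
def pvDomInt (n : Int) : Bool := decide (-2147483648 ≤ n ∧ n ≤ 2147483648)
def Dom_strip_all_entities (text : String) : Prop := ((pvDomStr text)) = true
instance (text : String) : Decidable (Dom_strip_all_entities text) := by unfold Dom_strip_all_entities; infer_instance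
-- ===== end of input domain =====

-- B replaces A's per-punctuation replace passes + split + filter with a single character
-- scan maintaining a token buffer (objective: alternative decomposition, one pass over the text).


-- string.punctuation
def pvPunct : List Char := "!\"#$%&'()*+,-./:;<=>?@[\\]^_`{|}~".toList

-- ===== PORT A =====
-- literal port of A: replace every punctuation char (except '@','#') by ' ', then
-- split on whitespace, strip each word, keep nonempty words not starting with '@'/'#', join.
def strip_all_entities (text : String) : String :=
  let entity_prefixes : List Char := ['@', '#']
  let t := pvPunct.foldl
    (fun t sep => if sep ∈ entity_prefixes then t else PySem.Chars.replace t [sep] [' '])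
    text.toList
  let words := (PySem.Chars.split₀ t).foldl
    (fun ws w =>
      let w := PySem.Chars.strip w
      if w.isEmpty then ws
      else if w.headI ∈ entity_prefixes then ws else ws ++ [w]) []
  String.ofList (PySem.Chars.join [' '] words)

-- ===== PORT B =====
-- delimiters: set(string.punctuation) - {'@','#'}
def pvDelims : List Char := pvPunct.filter (fun c => !(c ∈ (['@', '#'] : List Char)))

def pvIsDelim (c : Char) : Bool := (c ∈ pvDelims) || PySem.Chars.isspace c

-- the character scan of Source B: buffer the current token, flush at delimiters,
-- keep a flushed token unless it starts with '@'/'#'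
def pvScanGo : List Char → List Char → List (List Char) → List (List Char)
  | [], buf, kept =>
      if buf.isEmpty then kept
      else if buf.headI ∈ (['@', '#'] : List Char) then kept else kept ++ [buf]
  | c :: t, buf, kept =>
      if pvIsDelim c then
        pvScanGo t []
          (if buf.isEmpty then kept
           else if buf.headI ∈ (['@', '#'] : List Char) then kept else kept ++ [buf])
      else pvScanGo t (buf ++ [c]) kept

def strip_all_entities_alt (text : String) : String :=
  String.ofList (PySem.Chars.join [' '] (pvScanGo text.toList [] []))

-- ===== PRECONDITION & SPEC =====
def Spec_strip_all_entities (text : String) (out : String) : Prop := out = strip_all_entities_alt text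
instance (text : String) (out : String) : Decidable (Spec_strip_all_entities text out) := by unfold Spec_strip_all_entities; infer_instance

-- ===== CLAIM (what is proved, stated in full; the proofs are below) =====
def Claim_equal_strip_all_entities : Prop := ∀ (text : String), Dom_strip_all_entities text → Spec_strip_all_entities text (strip_all_entities text)

-- ===== LEMMAS AND PROOFS =====

-- the keep predicate shared by both pipelines
def pvKeep (w : List Char) : Bool := !(w.headI ∈ (['@', '#'] : List Char))

-- the character substitution A's replace loop performs
def pvSubst (c : Char) : Char := if c ∈ pvDelims then ' ' else c

-- replacing a single character is a map
theorem pvReplaceGo_single (a b : Char) :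
    ∀ (fuel : Nat) (l acc : List Char), l.length ≤ fuel →
      PySem.Chars.replace.go [a] [b] fuel l acc
        = acc.reverse ++ l.map (fun c => if c = a then b else c) := by
  intro fuel
  induction fuel with
  | zero => intro l acc h; cases l with
    | nil => simp [PySem.Chars.replace.go]
    | cons c t => simp at h
  | succ n ih =>
    intro l acc h
    cases l with
    | nil => simp [PySem.Chars.replace.go]
    | cons c t =>
      have h' : t.length ≤ n := by simpa using Nat.le_of_succ_le_succ h
      simp only [PySem.Chars.replace.go]
      by_cases hc : c = a
      · subst hc
        rw [if_pos (by simp [List.isPrefixOf])]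
        rw [ih _ _ (by simpa using h')]
        simp
      · rw [if_neg (by simp [List.isPrefixOf]; exact fun h => hc h.symm)]
        rw [ih _ _ h']
        simp [hc]

theorem pvReplace_single (a b : Char) (cs : List Char) :
    PySem.Chars.replace cs [a] [b] = cs.map (fun c => if c = a then b else c) := by
  simp only [PySem.Chars.replace, List.isEmpty_cons, if_false]
  simpa using pvReplaceGo_single a b cs.length cs [] le_rfl

-- the whole replace loop is a single map
theorem pvFoldlReplace (L : List Char) (hL : ' ' ∉ L) (cs : List Char) :
    L.foldl (fun t sep => if sep ∈ (['@','#'] : List Char) then t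
                          else PySem.Chars.replace t [sep] [' ']) cs
      = cs.map (fun c => if c ∈ L.filter (fun c => !(c ∈ (['@','#'] : List Char))) then ' ' else c) := by
  induction L generalizing cs with
  | nil => simp
  | cons p L ih =>
    have hL' : ' ' ∉ L := fun h => hL (List.mem_cons_of_mem _ h)
    by_cases hp : p ∈ (['@','#'] : List Char)
    · simp only [List.foldl_cons, if_pos hp, List.filter_cons]
      rw [ih hL']
      simp [hp]
    · simp only [List.foldl_cons, if_neg hp, List.filter_cons]
      rw [pvReplace_single, ih hL', List.map_map]
      apply List.map_congr_left
      intro c _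
      by_cases hc : c = p
      · subst hc
        have hsp : ' ' ∉ L.filter (fun c => !(c ∈ (['@','#'] : List Char))) := by
          intro h; exact hL' (List.mem_of_mem_filter h)
        simp [hp, hsp]
      · simp [hc, hp, Function.comp]

theorem pvFoldl_eq_map_subst (cs : List Char) :
    pvPunct.foldl (fun t sep => if sep ∈ (['@','#'] : List Char) then t
                                else PySem.Chars.replace t [sep] [' ']) cs
      = cs.map pvSubst := by
  rw [pvFoldlReplace pvPunct (by decide) cs]
  rfl

-- substitution turns exactly the delimiters into whitespace
theorem pvIsspace_subst (c : Char) : PySem.Chars.isspace (pvSubst c) = pvIsDelim c := by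
  unfold pvSubst pvIsDelim
  by_cases h : c ∈ pvDelims
  · rw [if_pos h, decide_eq_true h]
    simp
    decide
  · rw [if_neg h, decide_eq_false h]
    simp

theorem pvSubst_of_not_delim (c : Char) (h : pvIsDelim c = false) : pvSubst c = c := by
  unfold pvSubst
  unfold pvIsDelim at h
  simp only [Bool.or_eq_false_iff] at h
  rw [if_neg (of_decide_eq_false h.1)]

-- every word produced by split₀ is nonempty and whitespace-free
theorem pvSplitGo_words :
    ∀ (s cur : List Char) (acc : List (List Char)),
      (∀ w ∈ acc, w ≠ [] ∧ ∀ c ∈ w, PySem.Chars.isspace c = false) →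
      (∀ c ∈ cur, PySem.Chars.isspace c = false) →
      ∀ w ∈ PySem.Chars.split₀.go s cur acc,
        w ≠ [] ∧ ∀ c ∈ w, PySem.Chars.isspace c = false := by
  intro s
  induction s with
  | nil =>
    intro cur acc hacc hcur w hw
    simp only [PySem.Chars.split₀.go] at hw
    by_cases hc : cur.isEmpty
    · simp [hc] at hw
      exact hacc w (by simpa using hw)
    · simp [hc] at hw
      rcases hw with hw | hw
      · exact hacc w (by simpa using hw)
      · subst hw
        refine ⟨by simpa [List.isEmpty_iff] using hc, ?_⟩
        intro c hcw; exact hcur c (by simpa using hcw)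
  | cons c t ih =>
    intro cur acc hacc hcur w hw
    simp only [PySem.Chars.split₀.go] at hw
    by_cases hsp : PySem.Chars.isspace c
    · simp only [hsp, if_true] at hw
      by_cases hc : cur.isEmpty
      · simp only [hc, if_true] at hw
        exact ih [] acc hacc (by simp) w hw
      · simp only [hc, if_false] at hw
        refine ih [] _ ?_ (by simp) w hw
        intro v hv
        rcases List.mem_cons.mp hv with hv | hv
        · subst hv
          refine ⟨by simpa [List.isEmpty_iff] using hc, ?_⟩
          intro d hd; exact hcur d (by simpa using hd)
        · exact hacc v hv
    · simp only [hsp, if_false] at hw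
      refine ih (c :: cur) acc hacc ?_ w hw
      intro d hd
      rcases List.mem_cons.mp hd with hd | hd
      · subst hd; simpa using hsp
      · exact hcur d hd
-- A's word loop is a filter by pvKeep on split₀'s output
theorem pvDropWhile_eq_self (p : Char → Bool) (w : List Char)
    (h : ∀ c ∈ w, p c = false) : w.dropWhile p = w := by
  cases w with
  | nil => rfl
  | cons c t => simp [List.dropWhile_cons, h c (by simp)]

theorem pvStrip_of_spacefree (w : List Char)
    (h : ∀ c ∈ w, PySem.Chars.isspace c = false) : PySem.Chars.strip w = w := by
  unfold PySem.Chars.strip PySem.Chars.lstrip PySem.Chars.rstrip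
  rw [pvDropWhile_eq_self _ _ h,
      pvDropWhile_eq_self _ _ (by intro c hc; exact h c (by simpa using hc)),
      List.reverse_reverse]

theorem pvWordLoop_eq_filter (L : List (List Char))
    (hL : ∀ w ∈ L, w ≠ [] ∧ ∀ c ∈ w, PySem.Chars.isspace c = false) :
    ∀ init, L.foldl
      (fun ws w =>
        let w := PySem.Chars.strip w
        if w.isEmpty then ws
        else if w.headI ∈ (['@','#'] : List Char) then ws else ws ++ [w]) init
      = init ++ L.filter pvKeep := by
  induction L with
  | nil => simp
  | cons w L ih =>
    intro init
    have hw := hL w (List.mem_cons_self)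
    have hstrip : PySem.Chars.strip w = w := pvStrip_of_spacefree w hw.2
    have hne : w.isEmpty = false := by simpa [List.isEmpty_iff] using hw.1
    have hL' : ∀ v ∈ L, v ≠ [] ∧ ∀ c ∈ v, PySem.Chars.isspace c = false :=
      fun v hv => hL v (List.mem_cons_of_mem _ hv)
    simp only [List.foldl_cons, hstrip, hne, if_false, List.filter_cons]
    by_cases hk : w.headI ∈ (['@','#'] : List Char)
    · simp only [hk, if_true]
      rw [ih hL']
      simp [pvKeep, hk]
    · simp only [hk, if_false]
      rw [ih hL']
      simp [pvKeep, hk]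

-- the main scan lemma: filtering split₀'s output equals B's one-pass scan
theorem pvMain :
    ∀ (cs buf : List Char) (ws : List (List Char)),
      (PySem.Chars.split₀.go (cs.map pvSubst) buf.reverse ws.reverse).filter pvKeep
        = pvScanGo cs buf (ws.filter pvKeep) := by
  intro cs
  induction cs with
  | nil =>
    intro buf ws
    simp only [List.map_nil, PySem.Chars.split₀.go, pvScanGo]
    by_cases hb : buf.isEmpty
    · simp [hb]
    · simp only [List.isEmpty_reverse, hb, if_false, List.reverse_cons, List.reverse_reverse,
        List.filter_append, List.filter_cons]
      by_cases hk : buf.headI ∈ (['@','#'] : List Char)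
      · simp [pvKeep, hk]
      · simp [pvKeep, hk]
  | cons c t ih =>
    intro buf ws
    simp only [List.map_cons, PySem.Chars.split₀.go, pvIsspace_subst, pvScanGo]
    by_cases hd : pvIsDelim c
    · simp only [hd, if_true]
      by_cases hb : buf.isEmpty
      · simp only [List.isEmpty_reverse, hb, if_true]
        simpa using ih [] ws
      · have hb' : buf.isEmpty = false := by simpa using hb
        simp only [List.isEmpty_reverse, hb', Bool.false_eq_true, if_false, List.reverse_reverse]
        have : buf :: ws.reverse = (ws ++ [buf]).reverse := by simp
        rw [this]
        have h2 := ih [] (ws ++ [buf])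
        simp only [List.reverse_nil] at h2
        rw [h2, List.filter_append, List.filter_cons]
        by_cases hk : buf.headI ∈ (['@','#'] : List Char)
        · simp [pvKeep, hk]
        · simp [pvKeep, hk]
    · simp only [hd, if_false]
      rw [pvSubst_of_not_delim c (by simpa using hd)]
      have : c :: buf.reverse = (buf ++ [c]).reverse := by simp
      rw [this]
      exact ih (buf ++ [c]) ws

-- ===== VERDICT (by name: the statement is the Claim_ definition above) =====
theorem strip_all_entities_spec : Claim_equal_strip_all_entities := by
  intro text _
  unfold Spec_strip_all_entities strip_all_entities strip_all_entities_alt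
  simp only
  rw [pvFoldl_eq_map_subst]
  have hwords := pvSplitGo_words (text.toList.map pvSubst) [] [] (by simp) (by simp)
  rw [pvWordLoop_eq_filter _ (by
        intro w hw; exact hwords w (by simpa [PySem.Chars.split₀] using hw)) []]
  have := pvMain text.toList [] []
  simp only [List.reverse_nil, List.filter_nil] at this
  rw [List.nil_append, PySem.Chars.split₀] at *
  rw [this]
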